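-- pv_equiv track=rewrite | github.com/NickolisK24/le-the-forge | last-epoch-data/tools/scripts/process_skills.py | decode_bitmask
-- ===== SOURCE A (Python) =====
-- def decode_bitmask(value: int, enum_map: dict[int, str]) -> list[str]:
--     """Decode an integer bitmask into a list of enum member names."""
--     if not value:
--         return []
--     result = []
--     for bit_val in sorted(enum_map.keys()):
--         if bit_val > 0 and (value & bit_val) == bit_val:
--             result.append(enum_map[bit_val])
--     return result
-- ===== SOURCE B (Python) =====
-- def _insert(kv, lst):
--     """Insert (bit, name) into a key-ascending list, keeping it ordered."""
--     if not lst or lst[0][0] > kv[0]: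
--         return [kv] + lst
--     return [lst[0]] + _insert(kv, lst[1:])
--
-- def decode_bitmask(value: int, enum_map: dict[int, str]) -> list[str]:
--     """Decode an integer bitmask into a list of enum member names."""
--     result = []
--     for bit, name in enum_map.items():
--         if bit > 0 and (value & bit) == bit:
--             result = _insert((bit, name), result)
--     return [name for _, name in result]
-- ===== Notes on version B (the rewrite author's own statement) =====
-- stated objective: alternative
-- what changed: B never calls sort and never builds the full key list: it makes one pass over the items, inserting each matching (bit, name) pair into an ordered accumulator by recursive ordered insertion, then projects the names; A sorts all keys and filters them with per-key dict lookups.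
import Mathlib
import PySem

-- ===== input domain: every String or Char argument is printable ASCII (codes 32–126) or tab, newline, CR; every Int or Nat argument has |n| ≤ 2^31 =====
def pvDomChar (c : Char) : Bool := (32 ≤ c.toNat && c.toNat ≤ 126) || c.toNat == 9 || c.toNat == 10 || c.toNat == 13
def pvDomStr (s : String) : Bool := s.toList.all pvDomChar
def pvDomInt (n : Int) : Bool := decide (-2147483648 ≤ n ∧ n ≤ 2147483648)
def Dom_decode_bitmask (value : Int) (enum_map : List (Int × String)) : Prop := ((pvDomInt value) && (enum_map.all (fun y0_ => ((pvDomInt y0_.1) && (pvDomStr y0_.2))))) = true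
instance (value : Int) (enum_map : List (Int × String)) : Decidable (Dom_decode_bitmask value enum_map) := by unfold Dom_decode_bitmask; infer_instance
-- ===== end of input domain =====

-- B replaces A's sort-all-keys-then-filter-and-look-up scheme by a single pass over the
-- items that inserts each matching (bit, name) pair into an ordered accumulator by
-- recursive ordered insertion. Objective: alternative (no sort call, no key list, no lookups).

-- ===== PORT A =====
def decode_bitmask (value : Int) (enum_map : List (Int × String)) : List String :=
  if value = 0 then []            -- 'if not value' on an int
  else
    (PySem.List.sorted (enum_map.map Prod.fst) (fun x => x) false).foldl
      (fun result bit_val =>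
        if 0 < bit_val ∧ PySem.Int.band value bit_val = bit_val then
          result ++ [PySem.Dict.getD (PySem.Dict.mk enum_map) bit_val ""]
        else result) []

-- ===== PORT B =====
-- '_insert' of Source B: insert kv into a key-ascending list, keeping it ordered
def pvInsert (kv : Int × String) : List (Int × String) → List (Int × String)
  | [] => [kv]
  | x :: xs => if x.1 > kv.1 then kv :: x :: xs else x :: pvInsert kv xs

def decode_bitmask_alt (value : Int) (enum_map : List (Int × String)) : List String :=
  (enum_map.foldl
    (fun result kv =>
      if 0 < kv.1 ∧ PySem.Int.band value kv.1 = kv.1 then pvInsert kv result else result)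
    []).map Prod.snd

-- ===== PRECONDITION & SPEC =====
-- Pre_ requires the keys to be pairwise distinct; this is automatic for every Python dict
-- (a dict cannot hold duplicate keys), it only constrains the association-list encoding.
def Pre_decode_bitmask (value : Int) (enum_map : List (Int × String)) : Prop :=
  (enum_map.map Prod.fst).Nodup
instance (value : Int) (enum_map : List (Int × String)) : Decidable (Pre_decode_bitmask value enum_map) := by unfold Pre_decode_bitmask; infer_instance
def pvWitness_decode_bitmask : Int × (List (Int × String)) := (5, [(1, "A"), (2, "B"), (4, "C")])
def Spec_decode_bitmask (value : Int) (enum_map : List (Int × String)) (out : List String) : Prop := out = decode_bitmask_alt value enum_map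
instance (value : Int) (enum_map : List (Int × String)) (out : List String) : Decidable (Spec_decode_bitmask value enum_map out) := by unfold Spec_decode_bitmask; infer_instance

-- ===== CLAIM (what is proved, stated in full; the proofs are below) =====
def Claim_equal_decode_bitmask : Prop := ∀ (value : Int) (enum_map : List (Int × String)), Dom_decode_bitmask value enum_map → Pre_decode_bitmask value enum_map → Spec_decode_bitmask value enum_map (decode_bitmask value enum_map)

-- ===== LEMMAS AND PROOFS =====

-- pvInsert produces a permutation of cons.
theorem pv_insert_perm (kv : Int × String) (l : List (Int × String)) :
    (pvInsert kv l).Perm (kv :: l) := by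
  induction l with
  | nil => simp [pvInsert]
  | cons x xs ih =>
    unfold pvInsert
    split_ifs
    · exact List.Perm.refl _
    · exact (ih.cons x).trans (List.Perm.swap kv x xs)

-- pvInsert keeps the list strictly key-increasing when the new key is fresh.
theorem pv_insert_pairwise (kv : Int × String) (l : List (Int × String))
    (hp : l.Pairwise (fun a b => a.1 < b.1)) (hne : ∀ x ∈ l, x.1 ≠ kv.1) :
    (pvInsert kv l).Pairwise (fun a b => a.1 < b.1) := by
  induction l with
  | nil => simp [pvInsert]
  | cons x xs ih =>
    rw [List.pairwise_cons] at hp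
    unfold pvInsert
    split_ifs with h
    · refine List.pairwise_cons.mpr ⟨?_, List.pairwise_cons.mpr hp⟩
      intro y hy
      rcases List.mem_cons.mp hy with hy | hy
      · subst hy; omega
      · have := hp.1 y hy; omega
    · have hxne : x.1 ≠ kv.1 := hne x (by simp)
      refine List.pairwise_cons.mpr ⟨?_, ih hp.2 (fun y hy => hne y (by simp [hy]))⟩
      intro y hy
      rcases List.mem_cons.mp ((pv_insert_perm kv xs).mem_iff.mp hy) with hy' | hy'
      · subst hy'; omega
      · exact hp.1 y hy'

-- The insertion fold over any list with fresh, pairwise-distinct keys yields a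
-- permutation of res ++ l that is strictly key-increasing.
theorem pv_foldl_insert (l : List (Int × String)) : ∀ (res : List (Int × String)),
    ((res.map Prod.fst) ++ (l.map Prod.fst)).Nodup →
    res.Pairwise (fun a b => a.1 < b.1) →
    (l.foldl (fun r kv => pvInsert kv r) res).Perm (res ++ l) ∧
    (l.foldl (fun r kv => pvInsert kv r) res).Pairwise (fun a b => a.1 < b.1) := by
  induction l with
  | nil => intro res _ hp; simpa using hp
  | cons kv l ih =>
    intro res hnd hp
    simp only [List.foldl_cons]
    have hperm1 : ((pvInsert kv res).map Prod.fst ++ l.map Prod.fst).Perm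
        (res.map Prod.fst ++ (kv :: l).map Prod.fst) := by
      refine (((pv_insert_perm kv res).map Prod.fst).append_right _).trans ?_
      simpa using List.perm_middle.symm
    have hnd' : ((pvInsert kv res).map Prod.fst ++ l.map Prod.fst).Nodup :=
      hperm1.nodup_iff.mpr hnd
    have hne : ∀ x ∈ res, x.1 ≠ kv.1 := by
      intro x hx heq
      have hkv : kv.1 ∈ res.map Prod.fst := heq ▸ List.mem_map_of_mem hx
      have := (List.nodup_append.mp hnd).2.2
      exact this kv.1 hkv kv.1 (by simp) rfl
    have hp' := pv_insert_pairwise kv res hp hne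
    obtain ⟨hP, hQ⟩ := ih (pvInsert kv res) hnd' hp'
    refine ⟨hP.trans ?_, hQ⟩
    refine ((pv_insert_perm kv res).append_right l).trans ?_
    simpa using List.perm_middle.symm

-- A Pairwise (≤) list with no duplicates is Pairwise (<).
theorem pv_pairwise_lt_of_le_nodup (l : List Int)
    (hle : l.Pairwise (· ≤ ·)) (hnd : l.Nodup) : l.Pairwise (· < ·) := by
  have := hle.and hnd
  exact this.imp (fun h => lt_of_le_of_ne h.1 h.2)

-- The sorted filtered keys are exactly the first components of the sorted filtered items.
theorem pv_keys_eq (value : Int) (enum_map : List (Int × String))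
    (hnd : (enum_map.map Prod.fst).Nodup) :
    PySem.List.sorted
        ((enum_map.map Prod.fst).filter (fun b => decide (0 < b ∧ PySem.Int.band value b = b)))
        (fun x => x) false
      = (PySem.List.sorted
          (enum_map.filter (fun kv => decide (0 < kv.1 ∧ PySem.Int.band value kv.1 = kv.1)))
          Prod.fst false).map Prod.fst := by
  set p : Int → Bool := fun b => decide (0 < b ∧ PySem.Int.band value b = b) with hp
  set S := PySem.List.sorted (enum_map.filter (fun kv => p kv.1)) Prod.fst false with hS
  have hSperm : S.Perm (enum_map.filter (fun kv => p kv.1)) := PySem.List.sorted_perm _ _ _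
  have hmapfil : (enum_map.filter (fun kv => p kv.1)).map Prod.fst
      = (enum_map.map Prod.fst).filter p := by
    rw [List.filter_map]; rfl
  have hperm : (S.map Prod.fst).Perm ((enum_map.map Prod.fst).filter p) := by
    rw [← hmapfil]; exact hSperm.map Prod.fst
  have hndS : (S.map Prod.fst).Nodup := by
    refine hperm.nodup_iff.mpr ?_
    exact hnd.filter p
  have hle : (S.map Prod.fst).Pairwise (· ≤ ·) := by
    have := PySem.List.sorted_pairwise (enum_map.filter (fun kv => p kv.1)) Prod.fst
    rw [← hS] at this
    exact (List.pairwise_map).mpr this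
  exact PySem.List.sorted_eq_of_perm_of_pairwise_lt _ _ _ hperm
    (pv_pairwise_lt_of_le_nodup _ hle hndS)

-- Looking an item's key up in a duplicate-free dict returns that item's value.
theorem pv_lookup_eq (enum_map : List (Int × String)) (kv : Int × String)
    (hnd : (enum_map.map Prod.fst).Nodup) (hmem : kv ∈ enum_map) :
    PySem.Dict.getD (PySem.Dict.mk enum_map) kv.1 "" = kv.2 := by
  obtain ⟨k, v⟩ := kv
  have h : (PySem.Dict.mk enum_map).get? k = some v :=
    PySem.Dict.get?_of_mem_items (PySem.Dict.mk enum_map) hmem hnd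
  simp [PySem.Dict.getD, h]

-- With value = 0 no positive key can satisfy (0 & b) == b, so the filter is empty.
theorem pv_filter_zero (enum_map : List (Int × String)) :
    enum_map.filter (fun kv => decide (0 < kv.1 ∧ PySem.Int.band (0 : Int) kv.1 = kv.1)) = [] := by
  apply List.filter_eq_nil_iff.mpr
  intro kv _
  simp only [decide_eq_true_eq, not_and]
  intro hpos
  rw [PySem.Int.band_comm, PySem.Int.band_zero]
  omega

-- B's accumulator fold equals Python's stable sort of the filtered items.
theorem pv_alt_eq_sorted (value : Int) (enum_map : List (Int × String))
    (hnd : (enum_map.map Prod.fst).Nodup) :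
    decode_bitmask_alt value enum_map
      = (PySem.List.sorted
          (enum_map.filter (fun kv => decide (0 < kv.1 ∧ PySem.Int.band value kv.1 = kv.1)))
          Prod.fst false).map Prod.snd := by
  unfold decode_bitmask_alt
  rw [PySem.List.foldl_ite_eq_foldl_filter
    (p := fun kv => 0 < kv.1 ∧ PySem.Int.band value kv.1 = kv.1)
    (f := fun r kv => pvInsert kv r)]
  set F := enum_map.filter (fun kv => decide (0 < kv.1 ∧ PySem.Int.band value kv.1 = kv.1)) with hF
  have hndF : (([] : List (Int × String)).map Prod.fst ++ F.map Prod.fst).Nodup := by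
    simp only [List.map_nil, List.nil_append, hF]
    have : (F.map Prod.fst).Sublist (enum_map.map Prod.fst) := by
      rw [hF]; exact List.Sublist.map Prod.fst List.filter_sublist
    exact this.nodup hnd
  obtain ⟨hperm, hpair⟩ := pv_foldl_insert F [] hndF (by simp)
  have := PySem.List.sorted_eq_of_perm_of_pairwise_lt
    (xs := F) (key := Prod.fst)
    (ys := F.foldl (fun r kv => pvInsert kv r) []) (by simpa using hperm) hpair
  rw [this]

-- ===== VERDICT (by name: the statement is the Claim_ definition above) =====
theorem decode_bitmask_spec : Claim_equal_decode_bitmask := by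
  intro value enum_map _ hpre
  unfold Pre_decode_bitmask at hpre
  unfold Spec_decode_bitmask
  rw [pv_alt_eq_sorted value enum_map hpre]
  unfold decode_bitmask
  by_cases hv : value = 0
  · subst hv
    rw [if_pos rfl, pv_filter_zero]
    rfl
  · rw [if_neg hv, PySem.List.foldl_append_ite
      (p := fun b => 0 < b ∧ PySem.Int.band value b = b)
      (f := fun b => PySem.Dict.getD (PySem.Dict.mk enum_map) b "")]
    rw [List.nil_append]
    have hcomm : ((PySem.List.sorted (enum_map.map Prod.fst) (fun x => x) false).filter
        (fun b => decide (0 < b ∧ PySem.Int.band value b = b)))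
        = PySem.List.sorted
            ((enum_map.map Prod.fst).filter (fun b => decide (0 < b ∧ PySem.Int.band value b = b)))
            (fun x => x) false := by
      symm
      apply PySem.List.sorted_eq_of_perm_of_pairwise_lt
      · exact ((PySem.List.sorted_perm (enum_map.map Prod.fst) (fun x => x) false).filter _)
      · refine pv_pairwise_lt_of_le_nodup _ ?_ ?_
        · exact List.Pairwise.sublist List.filter_sublist
            (PySem.List.sorted_pairwise (enum_map.map Prod.fst) (fun x => x))
        · exact (((PySem.List.sorted_perm (enum_map.map Prod.fst) (fun x => x) false).nodup_iff).mpr hpre).filter _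
    rw [hcomm, pv_keys_eq value enum_map hpre, List.map_map]
    apply List.map_congr_left
    intro kv hkv
    have hmem : kv ∈ enum_map := by
      have := (PySem.List.mem_sorted _ _ _ _).mp hkv
      exact List.mem_of_mem_filter this
    exact pv_lookup_eq enum_map kv hpre hmem
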